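-- pv_equiv track=rewrite | github.com/zhangchi9/cross-border-tax-ai | backend/app/agentic_consultant.py | _extract_countries
-- ===== SOURCE A (Python) =====
-- from typing import AsyncGenerator, Dict, Any, List, Tuple, Optional
--
-- def _extract_countries(message: str) -> List[str]:
--     """
--     Extract country names from message
--     """
--     countries = []
--     country_keywords = {
--         'us': 'United States', 'usa': 'United States', 'united states': 'United States',
--         'america': 'United States', 'american': 'United States',
--         'canada': 'Canada', 'canadian': 'Canada',
--         'uk': 'United Kingdom', 'britain': 'United Kingdom', 'england': 'United Kingdom',
--         'germany': 'Germany', 'german': 'Germany',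
--         'france': 'France', 'french': 'France',
--         'australia': 'Australia', 'australian': 'Australia',
--         'japan': 'Japan', 'japanese': 'Japan',
--         'china': 'China', 'chinese': 'China',
--         'india': 'India', 'indian': 'India',
--         'mexico': 'Mexico', 'mexican': 'Mexico'
--     }
--
--     message_lower = message.lower()
--     for keyword, country in country_keywords.items():
--         if keyword in message_lower and country not in countries:
--             countries.append(country)
--
--     return countries
-- ===== SOURCE B (Python) =====
-- from typing import List
--
-- _SYNONYMS = [
--     ('United States', ('us', 'usa', 'united states', 'america', 'american')),
--     ('Canada', ('canada', 'canadian')),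
--     ('United Kingdom', ('uk', 'britain', 'england')),
--     ('Germany', ('germany', 'german')),
--     ('France', ('france', 'french')),
--     ('Australia', ('australia', 'australian')),
--     ('Japan', ('japan', 'japanese')),
--     ('China', ('china', 'chinese')),
--     ('India', ('india', 'indian')),
--     ('Mexico', ('mexico', 'mexican')),
-- ]
--
-- def _extract_countries(message: str) -> List[str]:
--     # Single left-to-right scan of the text: at each position, prefix-match the
--     # keywords of each not-yet-found country; emit found countries in table order.
--     text = message.lower()
--     found = set()
--     for i in range(len(text)):
--         for country, kws in _SYNONYMS:
--             if country not in found and any(text.startswith(kw, i) for kw in kws):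
--                 found.add(country)
--     return [country for country, _ in _SYNONYMS if country in found]
-- ===== Notes on version B (the rewrite author's own statement) =====
-- stated objective: alternative
-- what changed: Replaced A's keyword-driven pass (one substring search per dictionary keyword plus an in-loop output dedup) by a text-driven scanner: one left-to-right pass over the lowered message that prefix-matches each not-yet-found country's keywords at every position into a found-set, followed by a separate ordered emission pass over the country table.
import Mathlib
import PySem

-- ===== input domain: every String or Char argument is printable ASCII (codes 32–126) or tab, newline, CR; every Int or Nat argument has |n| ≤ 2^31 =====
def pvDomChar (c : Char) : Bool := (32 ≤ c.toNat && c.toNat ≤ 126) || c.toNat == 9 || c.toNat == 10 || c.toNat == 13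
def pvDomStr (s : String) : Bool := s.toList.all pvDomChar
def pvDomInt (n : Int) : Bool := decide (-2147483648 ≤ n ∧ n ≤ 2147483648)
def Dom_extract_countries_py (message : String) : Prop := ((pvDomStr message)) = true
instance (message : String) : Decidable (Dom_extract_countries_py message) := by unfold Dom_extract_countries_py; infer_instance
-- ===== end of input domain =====

-- B replaces A's keyword-driven substring searches (with an in-loop dedup) by a text-driven
-- scanner: one pass over the lowered message prefix-matching keywords into a found-set,
-- then an ordered emission pass (objective: alternative; same asymptotic cost).

-- ===== PORT A =====
-- the dict's items in insertion order (all keys distinct, so this is the literal order)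
def pvKwPairs : List (String × String) :=
  [("us", "United States"), ("usa", "United States"), ("united states", "United States"),
   ("america", "United States"), ("american", "United States"),
   ("canada", "Canada"), ("canadian", "Canada"),
   ("uk", "United Kingdom"), ("britain", "United Kingdom"), ("england", "United Kingdom"),
   ("germany", "Germany"), ("german", "Germany"),
   ("france", "France"), ("french", "France"),
   ("australia", "Australia"), ("australian", "Australia"),
   ("japan", "Japan"), ("japanese", "Japan"),
   ("china", "China"), ("chinese", "China"),
   ("india", "India"), ("indian", "India"),
   ("mexico", "Mexico"), ("mexican", "Mexico")]

def extract_countries_py (message : String) : List String :=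
  let message_lower := PySem.Str.lower message
  pvKwPairs.foldl
    (fun countries p =>
      if PySem.Str.isIn p.1 message_lower && !(countries.contains p.2)
      then countries ++ [p.2] else countries)
    []

-- ===== PORT B =====
-- B's module-level grouped table _SYNONYMS
def pvGroups : List (String × List String) :=
  [("United States", ["us", "usa", "united states", "america", "american"]),
   ("Canada", ["canada", "canadian"]),
   ("United Kingdom", ["uk", "britain", "england"]),
   ("Germany", ["germany", "german"]),
   ("France", ["france", "french"]),
   ("Australia", ["australia", "australian"]),
   ("Japan", ["japan", "japanese"]),
   ("China", ["china", "chinese"]),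
   ("India", ["india", "indian"]),
   ("Mexico", ["mexico", "mexican"])]

-- Python's text.startswith(kw, i) for 0 ≤ i is exactly startswith on text[i:]; ported as
-- PySem.Chars.startswith (text.drop i) — exact since i ranges over 0..len(text)-1.
def extract_countries_py_alt (message : String) : List String :=
  let text := PySem.Chars.lower message.toList
  let found := (List.range text.length).foldl
    (fun fnd i =>
      pvGroups.foldl
        (fun fnd g =>
          if !(PySem.Set.contains fnd g.1)
             && g.2.any (fun kw => PySem.Chars.startswith (text.drop i) kw.toList)
          then PySem.Set.add fnd g.1 else fnd)
        fnd)
    PySem.Set.empty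
  (pvGroups.filter (fun g => PySem.Set.contains found g.1)).map Prod.fst

-- ===== PRECONDITION & SPEC =====
def Spec_extract_countries_py (message : String) (out : List String) : Prop := out = extract_countries_py_alt message
instance (message : String) (out : List String) : Decidable (Spec_extract_countries_py message out) := by unfold Spec_extract_countries_py; infer_instance

-- ===== CLAIM (what is proved, stated in full; the proofs are below) =====
def Claim_equal_extract_countries_py : Prop := ∀ (message : String), Dom_extract_countries_py message → Spec_extract_countries_py message (extract_countries_py message)

-- ===== LEMMAS AND PROOFS =====

-- ---- A side: A's flat fold equals the canonical grouped filter ----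

-- A's loop body, abstracted over the lowered message
def pvStepA (m : String) (acc : List String) (p : String × String) : List String :=
  if PySem.Str.isIn p.1 m && !(acc.contains p.2) then acc ++ [p.2] else acc

theorem pvFold_group_mem (m c : String) (kws : List String) (acc : List String)
    (h : c ∈ acc) :
    (kws.map (fun k => (k, c))).foldl (pvStepA m) acc = acc := by
  induction kws with
  | nil => rfl
  | cons k ks ih =>
      simp only [List.map_cons, List.foldl_cons, pvStepA]
      rw [if_neg]
      · exact ih
      · simp [h]

theorem pvFold_group (m c : String) (kws : List String) (acc : List String)
    (h : c ∉ acc) :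
    (kws.map (fun k => (k, c))).foldl (pvStepA m) acc
      = if kws.any (fun kw => PySem.Str.isIn kw m) then acc ++ [c] else acc := by
  induction kws with
  | nil => simp
  | cons k ks ih =>
      simp only [List.map_cons, List.foldl_cons, List.any_cons, pvStepA]
      by_cases hk : PySem.Str.isIn k m = true
      · rw [if_pos (by rw [hk]; simp [h])]
        rw [pvFold_group_mem m c ks (acc ++ [c]) (by simp)]
        simp at hk
        simp [hk]
      · have hk' : PySem.Str.isIn k m = false := eq_false_of_ne_true hk
        rw [if_neg (by rw [hk']; simp), ih]
        simp at hk'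
        simp [hk']

theorem pvFold_groups (m : String) (gs : List (String × List String)) (acc : List String)
    (hdisj : ∀ g ∈ gs, g.1 ∉ acc) (hnd : (gs.map Prod.fst).Nodup) :
    (gs.flatMap (fun g => g.2.map (fun k => (k, g.1)))).foldl (pvStepA m) acc
      = acc ++ (gs.filter (fun g => g.2.any (fun kw => PySem.Str.isIn kw m))).map Prod.fst := by
  induction gs generalizing acc with
  | nil => simp
  | cons g gs ih =>
      simp only [List.flatMap_cons, List.foldl_append]
      rw [pvFold_group m g.1 g.2 acc (hdisj g (by simp))]
      simp only [List.map_cons, List.nodup_cons] at hnd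
      by_cases hany : g.2.any (fun kw => PySem.Str.isIn kw m) = true
      · rw [if_pos hany, ih (acc ++ [g.1])
          (by intro g' hg'; simp only [List.mem_append, List.mem_singleton]
              rintro (h | h)
              · exact hdisj g' (by simp [hg']) h
              · exact hnd.1 (h ▸ List.mem_map_of_mem hg')) hnd.2]
        rw [List.filter_cons, if_pos hany]
        simp
      · rw [if_neg hany, ih acc (fun g' hg' => hdisj g' (by simp [hg'])) hnd.2]
        rw [List.filter_cons, if_neg hany]

theorem pvKwPairs_eq_flat :
    pvKwPairs = pvGroups.flatMap (fun g => g.2.map (fun k => (k, g.1))) := by decide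

-- ---- B side: membership characterization of the scanner's found-set ----

-- inner loop (one text position) of B's scanner
def pvInner (text : List Char) (i : Nat) (fnd : PySem.Set String) : PySem.Set String :=
  pvGroups.foldl
    (fun fnd g =>
      if !(PySem.Set.contains fnd g.1)
         && g.2.any (fun kw => PySem.Chars.startswith (text.drop i) kw.toList)
      then PySem.Set.add fnd g.1 else fnd)
    fnd

theorem pvInner_foldl_mem (text : List Char) (i : Nat) (gs : List (String × List String))
    (fnd : PySem.Set String) (c : String) :
    (c ∈ gs.foldl
      (fun fnd g =>
        if !(PySem.Set.contains fnd g.1)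
           && g.2.any (fun kw => PySem.Chars.startswith (text.drop i) kw.toList)
        then PySem.Set.add fnd g.1 else fnd)
      fnd)
    ↔ c ∈ fnd ∨ ∃ g ∈ gs, c = g.1
        ∧ g.2.any (fun kw => PySem.Chars.startswith (text.drop i) kw.toList) = true := by
  induction gs generalizing fnd with
  | nil => simp
  | cons g gs ih =>
      simp only [List.foldl_cons]
      cases hca : PySem.Set.contains fnd g.1 with
      | false =>
        cases hab : g.2.any (fun kw => PySem.Chars.startswith (text.drop i) kw.toList) with
        | true =>
          rw [if_pos (by simp_all), ih]
          constructor
          · rintro (h | ⟨g', hg', hh1, hh2⟩)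
            · rcases (PySem.Set.mem_add fnd g.1 c).mp h with h' | h'
              · exact Or.inl h'
              · exact Or.inr ⟨g, by simp, h', hab⟩
            · exact Or.inr ⟨g', by simp [hg'], hh1, hh2⟩
          · rintro (h | ⟨g', hg', hh1, hh2⟩)
            · exact Or.inl ((PySem.Set.mem_add fnd g.1 c).mpr (Or.inl h))
            · rcases List.mem_cons.mp hg' with h' | h'
              · exact Or.inl ((PySem.Set.mem_add fnd g.1 c).mpr (Or.inr (by rw [hh1, h'])))
              · exact Or.inr ⟨g', h', hh1, hh2⟩
        | false =>
          rw [if_neg (by simp_all), ih]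
          constructor
          · rintro (h | ⟨g', hg', hh1, hh2⟩)
            · exact Or.inl h
            · exact Or.inr ⟨g', by simp [hg'], hh1, hh2⟩
          · rintro (h | ⟨g', hg', hh1, hh2⟩)
            · exact Or.inl h
            · rcases List.mem_cons.mp hg' with h' | h'
              · exact absurd hh2 (by rw [h', hab]; simp)
              · exact Or.inr ⟨g', h', hh1, hh2⟩
      | true =>
        rw [if_neg (by simp), ih]
        constructor
        · rintro (h | ⟨g', hg', hh1, hh2⟩)
          · exact Or.inl h
          · exact Or.inr ⟨g', by simp [hg'], hh1, hh2⟩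
        · rintro (h | ⟨g', hg', hh1, hh2⟩)
          · exact Or.inl h
          · rcases List.mem_cons.mp hg' with h' | h'
            · exact Or.inl (by rw [hh1, h']; exact (PySem.Set.contains_iff fnd g.1).mp hca)
            · exact Or.inr ⟨g', h', hh1, hh2⟩

theorem pvScan_mem (text : List Char) (n : Nat) (c : String) :
    (c ∈ (List.range n).foldl (fun fnd i => pvInner text i fnd) PySem.Set.empty)
    ↔ ∃ i < n, ∃ g ∈ pvGroups, c = g.1
        ∧ g.2.any (fun kw => PySem.Chars.startswith (text.drop i) kw.toList) = true := by
  induction n with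
  | zero => simp [PySem.Set.empty]
  | succ n ih =>
      rw [List.range_succ, List.foldl_append]
      simp only [List.foldl_cons, List.foldl_nil]
      rw [pvInner, pvInner_foldl_mem, ih]
      constructor
      · rintro (⟨i, hi, h⟩ | ⟨g, hg, h1, h2⟩)
        · exact ⟨i, Nat.lt_succ_of_lt hi, h⟩
        · exact ⟨n, Nat.lt_succ_self n, g, hg, h1, h2⟩
      · rintro ⟨i, hi, g, hg, h1, h2⟩
        rcases Nat.lt_succ_iff_lt_or_eq.mp hi with h' | h'
        · exact Or.inl ⟨i, h', g, hg, h1, h2⟩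
        · exact Or.inr ⟨g, hg, h1, h' ▸ h2⟩

-- every keyword in the table is nonempty
theorem pvKw_ne_nil : ∀ g ∈ pvGroups, ∀ kw ∈ g.2, kw.toList ≠ [] := by decide

-- the table's country names are pairwise distinct
theorem pvGroups_fst_nodup : (pvGroups.map Prod.fst).Nodup := by decide

-- for one country: some position prefix-matches iff some keyword is a substring
theorem pvHit_iff_isIn (text : List Char) (g : String × List String) (hg : g ∈ pvGroups) :
    (∃ i < text.length,
        g.2.any (fun kw => PySem.Chars.startswith (text.drop i) kw.toList) = true)
    ↔ g.2.any (fun kw => PySem.Chars.isIn kw.toList text) = true := by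
  simp only [List.any_eq_true, PySem.Chars.startswith_iff]
  constructor
  · rintro ⟨i, _, kw, hkw, hpre⟩
    exact ⟨kw, hkw, (PySem.Chars.exists_prefix_drop_iff_isIn kw.toList text).mp ⟨i, hpre⟩⟩
  · rintro ⟨kw, hkw, hin⟩
    obtain ⟨j, hpre⟩ := (PySem.Chars.exists_prefix_drop_iff_isIn kw.toList text).mpr hin
    refine ⟨j, ?_, kw, hkw, hpre⟩
    by_contra hj
    have : text.drop j = [] := List.drop_eq_nil_of_le (Nat.le_of_not_lt hj)
    rw [this] at hpre
    exact pvKw_ne_nil g hg kw hkw (List.prefix_nil.mp hpre)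

-- ===== VERDICT (by name: the statement is the Claim_ definition above) =====
theorem extract_countries_py_spec : Claim_equal_extract_countries_py := by
  intro message _
  show extract_countries_py message = extract_countries_py_alt message
  simp only [extract_countries_py, extract_countries_py_alt]
  rw [pvKwPairs_eq_flat]
  have hA := pvFold_groups (PySem.Str.lower message) pvGroups []
    (by intro g _ h; simp at h) pvGroups_fst_nodup
  rw [show (fun (countries : List String) (p : String × String) =>
        if PySem.Str.isIn p.1 (PySem.Str.lower message) && !(countries.contains p.2)
        then countries ++ [p.2] else countries) = pvStepA (PySem.Str.lower message) from rfl]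
  rw [hA, List.nil_append]
  -- both sides are maps of filters of pvGroups; show the filter predicates agree on pvGroups
  congr 1
  apply List.filter_congr
  intro g hg
  set text := PySem.Chars.lower message.toList with htext
  have hmem := pvScan_mem text text.length g.1
  -- reduce Str.isIn on the lowered String to Chars.isIn on text
  have hstr : ∀ kw : String, PySem.Str.isIn kw (PySem.Str.lower message)
      = PySem.Chars.isIn kw.toList text := by
    intro kw
    rw [htext]
    simp [PySem.Str.isIn_eq, PySem.Str.toList_lower]
  show (g.2.any fun kw => PySem.Str.isIn kw (PySem.Str.lower message))
    = PySem.Set.contains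
        ((List.range text.length).foldl (fun fnd i => pvInner text i fnd) PySem.Set.empty) g.1
  by_cases hc : PySem.Set.contains
      ((List.range text.length).foldl (fun fnd i => pvInner text i fnd) PySem.Set.empty) g.1 = true
  · have := (PySem.Set.contains_iff _ _).mp hc
    rw [hmem] at this
    obtain ⟨i, hi, g', hg', h1, h2⟩ := this
    -- countries are distinct, so g' = g
    have hgg : g' = g :=
      List.inj_on_of_nodup_map pvGroups_fst_nodup hg' hg h1.symm
    rw [hgg] at h2
    have : g.2.any (fun kw => PySem.Chars.isIn kw.toList text) = true :=
      (pvHit_iff_isIn text g hg).mp ⟨i, hi, h2⟩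
    rw [hc]
    have heq : (g.2.any fun kw => PySem.Str.isIn kw (PySem.Str.lower message))
        = g.2.any (fun kw => PySem.Chars.isIn kw.toList text) := by simp only [hstr]
    rw [heq, this]
  · have hc' : PySem.Set.contains
        ((List.range text.length).foldl (fun fnd i => pvInner text i fnd) PySem.Set.empty) g.1 = false :=
      eq_false_of_ne_true hc
    rw [hc', List.any_eq_false]
    intro kw hkw
    rw [hstr kw]
    by_contra hin
    have : ∃ i < text.length,
        g.2.any (fun kw => PySem.Chars.startswith (text.drop i) kw.toList) = true :=
      (pvHit_iff_isIn text g hg).mpr (List.any_eq_true.mpr ⟨kw, hkw, hin⟩)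
    obtain ⟨i, hi, h2⟩ := this
    have : g.1 ∈ (List.range text.length).foldl (fun fnd i => pvInner text i fnd) PySem.Set.empty :=
      (pvScan_mem text text.length g.1).mpr ⟨i, hi, g, hg, rfl, h2⟩
    exact hc ((PySem.Set.contains_iff _ _).mpr this)
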